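-- pv_equiv track=rewrite | github.com/iron-island/adventofcode | solutions/2024/24.py | get_bit_diff
-- ===== SOURCE A (Python) =====
-- def get_bit_diff(expected, actual):
--     i_list = []
--     for i in range(0, 46):
--         exp_bit = (expected >> i) & 1
--         actual_bit = (actual >> i) & 1
--
--         if (exp_bit != actual_bit):
--             i_list.append(i)
--
--     return i_list
-- ===== SOURCE B (Python) =====
-- def get_bit_diff(expected, actual):
--     diff = (expected ^ actual) % (1 << 46)
--     i_list = []
--     while diff:
--         low = diff & -diff
--         i_list.append(low.bit_length() - 1)
--         diff ^= low
--     return i_list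
-- ===== Notes on version B (the rewrite author's own statement) =====
-- stated objective: alternative
-- what changed: Instead of scanning all 46 bit positions of both integers and comparing bits pairwise, B XORs the inputs once, masks to the low 46 bits with % (1 << 46), and loops only over the set bits of the difference, extracting each lowest set bit with diff & -diff and computing its position via bit_length.
import Mathlib
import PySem

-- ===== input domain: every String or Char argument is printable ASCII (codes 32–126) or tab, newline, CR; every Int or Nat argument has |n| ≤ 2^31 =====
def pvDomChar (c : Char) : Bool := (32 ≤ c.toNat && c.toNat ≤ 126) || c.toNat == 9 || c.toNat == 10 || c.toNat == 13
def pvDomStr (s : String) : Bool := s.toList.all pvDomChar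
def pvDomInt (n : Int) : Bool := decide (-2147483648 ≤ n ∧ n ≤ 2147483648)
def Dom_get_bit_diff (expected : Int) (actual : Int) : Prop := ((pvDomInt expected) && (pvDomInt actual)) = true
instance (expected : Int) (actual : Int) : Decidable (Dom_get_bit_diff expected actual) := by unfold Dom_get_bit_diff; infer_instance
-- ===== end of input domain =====

-- B replaces A's fixed 46-iteration per-bit scan of both inputs by XOR-masking once and
-- extracting only the set bits of the difference lowest-bit-first (alternative algorithm,
-- fewer iterations when few bits differ); return values agree on all inputs.

-- ===== PORT A =====
-- i drawn from range(0,46) is always nonnegative, so `expected >> i` is `expected >>> i.toNat`.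
def get_bit_diff (expected : Int) (actual : Int) : List Int :=
  (PySem.List.pyRange 0 46).foldl (fun i_list i =>
    let exp_bit := PySem.Int.band (expected >>> i.toNat) 1
    let actual_bit := PySem.Int.band (actual >>> i.toNat) 1
    if exp_bit ≠ actual_bit then i_list ++ [i] else i_list) []

-- ===== PORT B =====
-- the `while diff:` loop of Source B; the fuel argument (46) only makes it total: diff starts
-- below 2^46 and each pass clears one set bit, so 46 iterations always suffice (proved below).
def pvAltLoop : Nat → Int → List Int → List Int
  | 0, _, i_list => i_list
  | fuel + 1, diff, i_list =>
    if diff ≠ 0 then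
      let low := PySem.Int.band diff (-diff)
      pvAltLoop fuel (PySem.Int.bxor diff low) (i_list ++ [(PySem.Int.bitLength low : Int) - 1])
    else i_list

def get_bit_diff_alt (expected : Int) (actual : Int) : List Int :=
  pvAltLoop 46 (PySem.Int.mod (PySem.Int.bxor expected actual) ((1 : Int) <<< (46 : Nat))) []

-- ===== PRECONDITION & SPEC =====
def Spec_get_bit_diff (expected : Int) (actual : Int) (out : List Int) : Prop := out = get_bit_diff_alt expected actual
instance (expected : Int) (actual : Int) (out : List Int) : Decidable (Spec_get_bit_diff expected actual out) := by unfold Spec_get_bit_diff; infer_instance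

-- ===== CLAIM (what is proved, stated in full; the proofs are below) =====
def Claim_equal_get_bit_diff : Prop := ∀ (expected : Int) (actual : Int), Dom_get_bit_diff expected actual → Spec_get_bit_diff expected actual (get_bit_diff expected actual)

-- ===== LEMMAS AND PROOFS =====

-- Python's bit i of an arbitrary integer n: ((n >> i) % 2 == 1)  (% with positive divisor = emod).
def pvBit (n : Int) (i : Nat) : Bool := decide ((n >>> i) % 2 = 1)

theorem pvBit_natCast (m i : Nat) : pvBit (m : Int) i = m.testBit i := by
  have h : (m : Int) >>> i = ((m >>> i : Nat) : Int) := rfl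
  rw [pvBit, h, Nat.shiftRight_eq_div_pow, Nat.testBit_eq_decide_div_mod_eq]
  simp only [decide_eq_decide]
  omega

theorem pvBit_negSucc (m i : Nat) : pvBit (-(m : Int) - 1) i = !m.testBit i := by
  have h : (-(m : Int) - 1) = Int.negSucc m := by
    rw [Int.negSucc_eq]; ring
  have h2 : Int.negSucc m >>> i = Int.negSucc (m >>> i) := rfl
  rw [pvBit, h, h2, Nat.shiftRight_eq_div_pow, Nat.testBit_eq_decide_div_mod_eq,
    Int.negSucc_eq]
  generalize m / 2 ^ i = k
  rcases Nat.mod_two_eq_zero_or_one k with hp | hp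
  · simp [hp]
    omega
  · simp [hp]
    omega

theorem pvBit_of_nonneg (a : Int) (ha : 0 ≤ a) (i : Nat) : pvBit a i = a.toNat.testBit i := by
  conv_lhs => rw [show a = ((a.toNat : Nat) : Int) by omega]
  exact pvBit_natCast _ _

theorem pvBit_of_neg (a : Int) (ha : a < 0) (i : Nat) : pvBit a i = !(-a - 1).toNat.testBit i := by
  conv_lhs => rw [show a = -(((-a - 1).toNat : Nat) : Int) - 1 by omega]
  exact pvBit_negSucc _ _

theorem pvBit_bxor (a b : Int) (i : Nat) :
    pvBit (PySem.Int.bxor a b) i = (pvBit a i ^^ pvBit b i) := by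
  unfold PySem.Int.bxor
  by_cases ha : 0 ≤ a <;> by_cases hb : 0 ≤ b
  · rw [if_pos ha, if_pos hb, pvBit_natCast, pvBit_of_nonneg a ha, pvBit_of_nonneg b hb,
      Nat.testBit_xor]
  · rw [if_pos ha, if_neg hb, pvBit_negSucc, pvBit_of_nonneg a ha,
      pvBit_of_neg b (by omega), Nat.testBit_xor]
    cases a.toNat.testBit i <;> cases (-b - 1).toNat.testBit i <;> rfl
  · rw [if_neg ha, if_pos hb, pvBit_negSucc, pvBit_of_neg a (by omega),
      pvBit_of_nonneg b hb, Nat.testBit_xor]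
    cases (-a - 1).toNat.testBit i <;> cases b.toNat.testBit i <;> rfl
  · rw [if_neg ha, if_neg hb, pvBit_natCast, pvBit_of_neg a (by omega),
      pvBit_of_neg b (by omega), Nat.testBit_xor]
    cases (-a - 1).toNat.testBit i <;> cases (-b - 1).toNat.testBit i <;> rfl

theorem pvBit_mod46 (x : Int) (i : Nat) (hi : i < 46) :
    pvBit (PySem.Int.mod x ((1 : Int) <<< (46 : Nat))) i = pvBit x i := by
  have hb : ((1 : Int) <<< (46 : Nat)) = 70368744177664 := by decide
  rw [hb]
  have hsplit := PySem.Int.floordiv_mul_add_mod x 70368744177664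
  set q := PySem.Int.floordiv x 70368744177664 with hq
  set d := PySem.Int.mod x 70368744177664 with hd
  rw [pvBit, pvBit, Int.shiftRight_eq_div_pow, Int.shiftRight_eq_div_pow, ← hsplit]
  have h2 : q * 70368744177664 + d = d + (2 * (q * 2 ^ (45 - i))) * ((2 ^ i : Nat) : Int) := by
    have hpow : (70368744177664 : Int) = ((2 ^ i : Nat) : Int) * (2 * 2 ^ (45 - i)) := by
      push_cast
      rw [show (70368744177664 : Int) = 2 ^ 46 by norm_num,
        show (46 : Nat) = i + (1 + (45 - i)) by omega, pow_add, pow_add]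
      ring
    rw [hpow]; ring
  rw [h2, Int.add_mul_ediv_right _ _ (by positivity)]
  generalize d / ((2 ^ i : Nat) : Int) = A
  generalize q * 2 ^ (45 - i) = c
  simp only [decide_eq_decide]
  omega

-- A's loop condition at index i, reduced to the xor's bit i.
theorem cond_eq_pvBit (e a : Int) (i : Nat) :
    (¬ PySem.Int.band (e >>> i) 1 = PySem.Int.band (a >>> i) 1)
      ↔ pvBit (PySem.Int.bxor e a) i = true := by
  rw [pvBit_bxor, PySem.Int.band_one, PySem.Int.band_one]
  have hf : ∀ z : Int, PySem.Int.mod z 2 = z % 2 := by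
    intro z
    show z.fmod 2 = z % 2
    rw [Int.fmod_eq_emod]
    simp
  rw [hf, hf, pvBit, pvBit]
  have h1 : 0 ≤ (e >>> i) % 2 ∧ (e >>> i) % 2 < 2 :=
    ⟨Int.emod_nonneg _ (by norm_num), Int.emod_lt_of_pos _ (by norm_num)⟩
  have h2 : 0 ≤ (a >>> i) % 2 ∧ (a >>> i) % 2 < 2 :=
    ⟨Int.emod_nonneg _ (by norm_num), Int.emod_lt_of_pos _ (by norm_num)⟩
  by_cases he : (e >>> i) % 2 = 1 <;> by_cases hb : (a >>> i) % 2 = 1 <;>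
    simp [he, hb] <;> omega

theorem foldA_gen (e a : Int) : ∀ (l : List Nat) (acc : List Int),
    (l.map Int.ofNat).foldl (fun i_list i =>
      let exp_bit := PySem.Int.band (e >>> i.toNat) 1
      let actual_bit := PySem.Int.band (a >>> i.toNat) 1
      if exp_bit ≠ actual_bit then i_list ++ [i] else i_list) acc
    = acc ++ (l.filter (fun i => pvBit (PySem.Int.bxor e a) i)).map Int.ofNat := by
  intro l
  induction l with
  | nil => intro acc; simp
  | cons x xs ih =>
    intro acc
    rw [List.map_cons, List.foldl_cons, List.filter_cons]
    show (xs.map Int.ofNat).foldl _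
        (if PySem.Int.band (e >>> ((x : Int))) 1 ≠ PySem.Int.band (a >>> ((x : Int))) 1
         then acc ++ [Int.ofNat x] else acc) = _
    rw [Int.shiftRight_natCast_right, Int.shiftRight_natCast_right]
    by_cases hc : pvBit (PySem.Int.bxor e a) x = true
    · rw [if_pos ((cond_eq_pvBit e a x).mpr hc), hc, if_pos rfl, ih, List.map_cons]
      simp
    · rw [if_neg (fun h => hc ((cond_eq_pvBit e a x).mp h)), ih]
      rw [if_neg hc]

theorem A_characterization (e a : Int) :
    get_bit_diff e a
      = ((List.range 46).filter (fun i => pvBit (PySem.Int.bxor e a) i)).map Int.ofNat := by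
  unfold get_bit_diff
  rw [show PySem.List.pyRange 0 46 1 = (List.range 46).map Int.ofNat from by decide]
  exact foldA_gen e a (List.range 46) []

-- ---- bit decomposition n = 2^(t+1)*m + 2^t (t = lowest set bit) ----

theorem tb_main (t m j : Nat) :
    (2 ^ (t + 1) * m + 2 ^ t).testBit j
      = if j < t + 1 then decide (t = j) else m.testBit (j - (t + 1)) := by
  rw [Nat.testBit_two_pow_mul_add m
    (Nat.pow_lt_pow_right (by norm_num) (Nat.lt_succ_self t)) j]
  split <;> simp [Nat.testBit_two_pow]

theorem tb_rest (t m j : Nat) :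
    (2 ^ (t + 1) * m).testBit j = if j < t + 1 then false else m.testBit (j - (t + 1)) := by
  have h := Nat.testBit_two_pow_mul_add m (show (0 : Nat) < 2 ^ (t + 1) by positivity) j
  rw [Nat.add_zero] at h
  rw [h]
  split <;> simp

theorem and_pred_eq (t m : Nat) :
    (2 ^ (t + 1) * m + 2 ^ t) &&& (2 ^ (t + 1) * m + 2 ^ t - 1) = 2 ^ (t + 1) * m := by
  have hpos : 1 ≤ (2 : Nat) ^ t := Nat.one_le_two_pow
  have hlt : 2 ^ t - 1 < 2 ^ (t + 1) := by
    have := Nat.pow_lt_pow_right (show 1 < 2 by norm_num) (Nat.lt_succ_self t)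
    omega
  have hpred : 2 ^ (t + 1) * m + 2 ^ t - 1 = 2 ^ (t + 1) * m + (2 ^ t - 1) := by omega
  apply Nat.eq_of_testBit_eq
  intro j
  rw [Nat.testBit_and, tb_main, hpred, Nat.testBit_two_pow_mul_add m hlt j, tb_rest]
  by_cases h : j < t + 1
  · rw [if_pos h, if_pos h, if_pos h, Nat.testBit_two_pow_sub_one]
    by_cases h1 : t = j
    · subst h1; simp
    · simp [h1]
  · rw [if_neg h, if_neg h, if_neg h, Bool.and_self]

theorem xor_low_eq (t m : Nat) :
    (2 ^ (t + 1) * m + 2 ^ t) ^^^ 2 ^ t = 2 ^ (t + 1) * m := by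
  apply Nat.eq_of_testBit_eq
  intro j
  rw [Nat.testBit_xor, tb_main, tb_rest, Nat.testBit_two_pow]
  by_cases h : j < t + 1
  · rw [if_pos h, if_pos h]
    by_cases h1 : t = j <;> simp [h1]
  · rw [if_neg h, if_neg h, show decide (t = j) = false by simp; omega, Bool.xor_false]

theorem bitLength_two_pow (t : Nat) : PySem.Int.bitLength ((2 ^ t : Nat) : Int) = t + 1 := by
  have h1 := PySem.Int.lt_two_pow_bitLength ((2 ^ t : Nat) : Int)
  have h2 := PySem.Int.two_pow_bitLength_le ((2 ^ t : Nat) : Int) (by positivity)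
  rw [Int.natAbs_natCast] at h1 h2
  have ht1 : t < PySem.Int.bitLength ((2 ^ t : Nat) : Int) :=
    (Nat.pow_lt_pow_iff_right (by norm_num)).mp h1
  have ht2 : PySem.Int.bitLength ((2 ^ t : Nat) : Int) - 1 ≤ t :=
    (Nat.pow_le_pow_iff_right (by norm_num)).mp h2
  omega

-- ---- splitting the sorted position list at the lowest set bit ----

theorem filter_split (p q : Nat → Bool) (t : Nat) (hpt : p t = true) (hqt : q t = false)
    (hlow : ∀ i, i < t → p i = false) (hagree : ∀ i, i ≠ t → q i = p i) :
    ∀ N, t < N → (List.range N).filter p = t :: (List.range N).filter q := by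
  intro N
  induction N with
  | zero => omega
  | succ n ih =>
    intro h
    rw [List.range_succ, List.filter_append, List.filter_append]
    by_cases hn : t = n
    · subst hn
      have hp0 : (List.range t).filter p = [] := by
        rw [List.filter_eq_nil_iff]
        intro i hi
        simp [hlow i (List.mem_range.mp hi)]
      have hq0 : (List.range t).filter q = [] := by
        rw [List.filter_eq_nil_iff]
        intro i hi
        have hi' := List.mem_range.mp hi
        rw [hagree i (by omega), hlow i hi']
        simp
      simp [hp0, hq0, List.filter, hpt, hqt]
    · have ht : t < n := by omega
      rw [ih ht]
      have hqp : p n = q n := (hagree n (by omega)).symm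
      simp [List.filter, hqp]

-- recursion equation of the loop, with the let zeta-reduced
theorem pvAltLoop_succ (f : Nat) (diff : Int) (out : List Int) :
    pvAltLoop (f + 1) diff out
      = if diff ≠ 0 then
          pvAltLoop f (PySem.Int.bxor diff (PySem.Int.band diff (-diff)))
            (out ++ [(PySem.Int.bitLength (PySem.Int.band diff (-diff)) : Int) - 1])
        else out := rfl

-- ---- the main loop invariant ----

theorem loop_eq (n : Nat) : ∀ (f k : Nat) (out : List Int), n < 2 ^ 46 →
    (∀ i, n.testBit i = true → k ≤ i) → 46 ≤ f + k →
    pvAltLoop f (n : Int) out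
      = out ++ ((List.range 46).filter (fun i => n.testBit i)).map Int.ofNat := by
  induction n using Nat.strong_induction_on with
  | _ n IH =>
  intro f k out hlt hk hfk
  by_cases hn : n = 0
  · subst hn
    cases f <;> simp [pvAltLoop, Nat.zero_testBit]
  · obtain ⟨t, m', hodd, hnm⟩ := Nat.exists_eq_two_pow_mul_odd hn
    obtain ⟨m, hm⟩ := hodd
    have hn' : n = 2 ^ (t + 1) * m + 2 ^ t := by rw [hnm, hm]; ring
    have hpow_pos : 1 ≤ (2 : Nat) ^ t := Nat.one_le_two_pow
    have htb : n.testBit t = true := by rw [hn', tb_main]; simp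
    have ht46 : t < 46 := by
      by_contra hcon
      have hlt2 : n < 2 ^ t :=
        lt_of_lt_of_le hlt (Nat.pow_le_pow_right (by norm_num) (by omega))
      rw [Nat.testBit_lt_two_pow hlt2] at htb
      exact Bool.false_ne_true htb
    have hkt : k ≤ t := hk t htb
    cases f with
    | zero => omega
    | succ f' =>
      rw [pvAltLoop_succ, if_pos (by exact_mod_cast hn)]
      have hlow : PySem.Int.band (n : Int) (-(n : Int)) = ((2 ^ t : Nat) : Int) := by
        unfold PySem.Int.band
        rw [if_pos (by positivity), if_neg (by simp; omega)]
        have h1 : (-(-(n : Int)) - 1).toNat = n - 1 := by omega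
        have h2 : ((n : Int)).toNat = n := Int.toNat_natCast n
        rw [h1, h2]
        congr 1
        have hap := and_pred_eq t m
        rw [← hn'] at hap
        rw [hap, hn']
        omega
      rw [hlow]
      have hbl : ((PySem.Int.bitLength ((2 ^ t : Nat) : Int) : Nat) : Int) - 1 = (t : Int) := by
        rw [bitLength_two_pow]; push_cast; ring
      rw [hbl]
      have hxor : PySem.Int.bxor (n : Int) ((2 ^ t : Nat) : Int) = ((n - 2 ^ t : Nat) : Int) := by
        unfold PySem.Int.bxor
        rw [if_pos (by positivity), if_pos (by positivity), Int.toNat_natCast, Int.toNat_natCast]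
        congr 1
        have hxl := xor_low_eq t m
        rw [← hn'] at hxl
        rw [hxl, hn']
        omega
      rw [hxor]
      have hsub : n - 2 ^ t = 2 ^ (t + 1) * m := by rw [hn']; omega
      rw [IH (n - 2 ^ t) (by omega) f' (t + 1) _ (by omega)
        (by
          intro i hi
          rw [hsub, tb_rest] at hi
          by_contra hcon
          simp [show i < t + 1 by omega] at hi)
        (by omega)]
      have hsplit : (List.range 46).filter (fun i => n.testBit i)
          = t :: (List.range 46).filter (fun i => (n - 2 ^ t).testBit i) := by
        apply filter_split _ _ t htb
          (by rw [hsub, tb_rest]; simp)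
          (by intro i hi; rw [hn', tb_main, if_pos (by omega)]; simp; omega)
          (by
            intro i hi
            rw [hsub, tb_rest, hn', tb_main]
            by_cases h : i < t + 1
            · rw [if_pos h, if_pos h]
              simp
              omega
            · rw [if_neg h, if_neg h])
          46 ht46
      rw [hsplit]
      simp

-- ===== VERDICT (by name: the statement is the Claim_ definition above) =====
theorem get_bit_diff_spec : Claim_equal_get_bit_diff := by
  intro expected actual _
  show get_bit_diff expected actual = get_bit_diff_alt expected actual
  have hbpos : (0 : Int) < (1 : Int) <<< (46 : Nat) := by decide
  set d := PySem.Int.mod (PySem.Int.bxor expected actual) ((1 : Int) <<< (46 : Nat)) with hd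
  have hd0 : 0 ≤ d := PySem.Int.mod_nonneg _ hbpos
  have hdlt : d < (1 : Int) <<< (46 : Nat) := PySem.Int.mod_lt _ hbpos
  have hdn : d = ((d.toNat : Nat) : Int) := by omega
  have hdnlt : d.toNat < 2 ^ 46 := by
    have h46 : ((1 : Int) <<< (46 : Nat)) = 70368744177664 := by decide
    rw [h46] at hdlt
    omega
  rw [A_characterization]
  unfold get_bit_diff_alt
  rw [← hd, hdn, loop_eq d.toNat 46 0 [] hdnlt (fun i _ => Nat.zero_le i) (by omega),
    List.nil_append]
  congr 1
  apply List.filter_congr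
  intro i hi
  have hi46 : i < 46 := List.mem_range.mp hi
  rw [← pvBit_mod46 (PySem.Int.bxor expected actual) i hi46, ← hd, hdn, pvBit_natCast,
    Int.toNat_natCast]
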